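-- pv_equiv track=rewrite | github.com/jamesstaub/Listen-Up | listenup/microservices/librosa_service/manifest.py | parse_output_files
-- ===== SOURCE A (Python) =====
-- def parse_output_files(command: str) -> list:
--     """
--     For Librosa, assume all subsequent arguments with file extensions are output files.
--     """
--     args = command.split()
--     found_input = False
--     outputs = []
--     for arg in args:
--         if "." in arg and not arg.startswith("-"):
--             if not found_input:
--                 found_input = True
--             else:
--                 outputs.append(arg)
--     return outputs
-- ===== SOURCE B (Python) =====
-- def parse_output_files(command: str) -> list:
--     def is_file(arg):
--         return "." in arg and not arg.startswith("-")
--     args = command.split()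
--     i = 0
--     while i < len(args) and not is_file(args[i]):
--         i += 1
--     # args[i] (if any) is the input file; collect qualifying tokens after it
--     return [arg for arg in args[i + 1:] if is_file(arg)]
-- ===== Notes on version B (the rewrite author's own statement) =====
-- stated objective: alternative
-- what changed: Replaced the flag-carrying single pass by two staged passes: a search loop locating the first qualifying token, then a filter over only the tokens after it.
import Mathlib
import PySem

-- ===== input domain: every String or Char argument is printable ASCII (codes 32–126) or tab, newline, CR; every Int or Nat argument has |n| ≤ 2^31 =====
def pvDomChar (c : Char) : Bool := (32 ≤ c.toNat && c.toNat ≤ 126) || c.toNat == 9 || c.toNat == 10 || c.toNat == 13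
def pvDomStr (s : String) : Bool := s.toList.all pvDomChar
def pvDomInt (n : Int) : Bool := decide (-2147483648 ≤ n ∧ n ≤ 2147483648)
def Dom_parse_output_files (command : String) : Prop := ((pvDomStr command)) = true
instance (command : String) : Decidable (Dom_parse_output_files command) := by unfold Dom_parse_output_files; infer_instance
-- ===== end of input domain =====

-- B replaces A's flag-carrying single pass by two staged passes: search for the first qualifying token, then filter the tokens after it (same return value).

-- ===== PORT A =====
-- literal port: single pass with a found_input flag
def parse_output_files (command : String) : List String :=
  let args := PySem.Str.split₀ command
  let res := args.foldl
    (fun (st : Bool × List String) arg =>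
      if PySem.Str.isIn "." arg && !PySem.Str.startswith arg "-" then
        if !st.1 then (true, st.2) else (st.1, st.2 ++ [arg])
      else st)
    (false, [])
  res.2

-- ===== PORT B =====
-- B's is_file helper
def pvIsFile (arg : String) : Bool := PySem.Str.isIn "." arg && !PySem.Str.startswith arg "-"

-- B's while loop: advance past tokens until (and including) the first one with is_file
def pvSkipToInput (args : List String) : List String :=
  match args with
  | [] => []
  | a :: t => if pvIsFile a then t else pvSkipToInput t

-- search-then-filter
def parse_output_files_alt (command : String) : List String :=
  (pvSkipToInput (PySem.Str.split₀ command)).filter pvIsFile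

-- ===== PRECONDITION & SPEC =====
def Spec_parse_output_files (command : String) (out : List String) : Prop := out = parse_output_files_alt command
instance (command : String) (out : List String) : Decidable (Spec_parse_output_files command out) := by unfold Spec_parse_output_files; infer_instance

-- ===== CLAIM (what is proved, stated in full; the proofs are below) =====
def Claim_equal_parse_output_files : Prop := ∀ (command : String), Dom_parse_output_files command → Spec_parse_output_files command (parse_output_files command)

-- ===== LEMMAS AND PROOFS =====
-- A's flag loop computes: all matches if the flag is already set, else all matches but the first
theorem pv_foldl_flag (p : String → Bool) (l : List String) (acc : List String) (f : Bool) :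
    (l.foldl
      (fun (st : Bool × List String) arg =>
        if p arg then
          if !st.1 then (true, st.2) else (st.1, st.2 ++ [arg])
        else st)
      (f, acc)).2
    = acc ++ (if f then l.filter p else (l.filter p).drop 1) := by
  induction l generalizing acc f with
  | nil => cases f <;> simp
  | cons a t ih =>
    simp only [List.foldl_cons]
    by_cases hp : p a = true
    · rw [if_pos hp]
      cases f
      · rw [if_pos (by decide), ih, List.filter_cons_of_pos hp]
        simp
      · rw [if_neg (by decide), ih, List.filter_cons_of_pos hp]
        simp
    · rw [if_neg hp, ih, List.filter_cons_of_neg hp]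

-- B's search-then-filter equals "all matches but the first"
theorem pv_skip_filter (l : List String) :
    (pvSkipToInput l).filter pvIsFile = (l.filter pvIsFile).drop 1 := by
  induction l with
  | nil => simp [pvSkipToInput]
  | cons a t ih =>
    by_cases hp : pvIsFile a = true
    · simp [pvSkipToInput, hp, List.filter_cons_of_pos hp]
    · simp only [pvSkipToInput, if_neg hp, ih, List.filter_cons_of_neg hp]

-- ===== VERDICT (by name: the statement is the Claim_ definition above) =====
theorem parse_output_files_spec : Claim_equal_parse_output_files := by
  intro command _
  unfold Spec_parse_output_files parse_output_files parse_output_files_alt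
  rw [pv_foldl_flag, pv_skip_filter]
  unfold pvIsFile PySem.Str.isIn PySem.Str.startswith
  rfl
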